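-- pv_equiv track=rewrite | github.com/seyfullah642/weill_cornell | In-production/scripts-2/transform.py | _sort_variants
-- ===== SOURCE A (Python) =====
-- def _sort_variants(entries):
--     results = {
--         'fusions': [],
--         'small_mutations': [],
--         'cnvs': []
--     }
--     for entry in entries:
--         typ = entry['Type']
--         if typ == 'Fusion' or typ == 'RNAExonVariant':
--             results['fusions'].append(entry)
--         elif typ == 'CNV':
--             results['cnvs'].append(entry)
--         elif typ:
--             results['small_mutations'].append(entry)
--     return results
-- ===== SOURCE B (Python) =====
-- FUSION_TYPES = ('Fusion', 'RNAExonVariant')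
--
--
-- def _sort_variants(entries):
--     return {
--         'fusions': [e for e in entries if e['Type'] in FUSION_TYPES],
--         'small_mutations': [e for e in entries
--                             if e['Type'] and e['Type'] not in FUSION_TYPES
--                             and e['Type'] != 'CNV'],
--         'cnvs': [e for e in entries if e['Type'] == 'CNV'],
--     }
-- ===== Notes on version B (the rewrite author's own statement) =====
-- stated objective: idiomatic
-- what changed: Replaces the single loop with mutable buckets by a dict of three filtering list comprehensions, one pass per bucket, encoding the elif precedence in each predicate.
import Mathlib
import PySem

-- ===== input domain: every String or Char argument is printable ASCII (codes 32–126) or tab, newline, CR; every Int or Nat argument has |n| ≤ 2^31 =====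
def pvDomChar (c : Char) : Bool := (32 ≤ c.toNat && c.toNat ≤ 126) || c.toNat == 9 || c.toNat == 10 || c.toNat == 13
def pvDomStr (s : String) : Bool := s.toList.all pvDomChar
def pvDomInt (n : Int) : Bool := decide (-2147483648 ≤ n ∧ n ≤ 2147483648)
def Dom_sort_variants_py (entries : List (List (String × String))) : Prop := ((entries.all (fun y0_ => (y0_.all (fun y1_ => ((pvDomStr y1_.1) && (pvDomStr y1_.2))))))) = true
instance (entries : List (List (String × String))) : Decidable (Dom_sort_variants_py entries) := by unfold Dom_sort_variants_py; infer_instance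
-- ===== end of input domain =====

-- B replaces A's single loop over mutable buckets by three filtering passes (idiomatic dict of comprehensions); same return value.


-- entry['Type']: first-match lookup in the association list (Python dict access); none = KeyError
def pvTyp (e : List (String × String)) : Option String :=
  (e.find? (fun p => p.1 == "Type")).map (·.2)

-- ===== PORT A =====
-- one fold over entries carrying the three buckets (fusions, small_mutations, cnvs);
-- the `none` (KeyError) case never occurs under Pre_
def stepA (acc : List (List (String × String)) × List (List (String × String)) × List (List (String × String)))
    (entry : List (String × String)) :
    List (List (String × String)) × List (List (String × String)) × List (List (String × String)) :=
  match pvTyp entry with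
  | none => acc
  | some typ =>
    if typ == "Fusion" || typ == "RNAExonVariant" then (acc.1 ++ [entry], acc.2.1, acc.2.2)
    else if typ == "CNV" then (acc.1, acc.2.1, acc.2.2 ++ [entry])
    else if !(typ == "") then (acc.1, acc.2.1 ++ [entry], acc.2.2)
    else acc

def sort_variants_py (entries : List (List (String × String))) : List (String × List (List (String × String))) :=
  let r := entries.foldl stepA ([], [], [])
  [("fusions", r.1), ("small_mutations", r.2.1), ("cnvs", r.2.2)]

-- ===== PORT B =====
def isFusB (e : List (String × String)) : Bool :=
  match pvTyp e with
  | some t => t == "Fusion" || t == "RNAExonVariant"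
  | none => false

def isSmallB (e : List (String × String)) : Bool :=
  match pvTyp e with
  | some t => !(t == "") && !(t == "Fusion" || t == "RNAExonVariant") && !(t == "CNV")
  | none => false

def isCnvB (e : List (String × String)) : Bool :=
  match pvTyp e with
  | some t => t == "CNV"
  | none => false

def sort_variants_py_alt (entries : List (List (String × String))) : List (String × List (List (String × String))) :=
  [("fusions", entries.filter isFusB),
   ("small_mutations", entries.filter isSmallB),
   ("cnvs", entries.filter isCnvB)]

-- ===== PRECONDITION & SPEC =====
-- Pre_ excludes exactly the inputs where some entry lacks the key "Type": there A raises KeyError.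
def Pre_sort_variants_py (entries : List (List (String × String))) : Prop :=
  ∀ e ∈ entries, "Type" ∈ e.map Prod.fst
instance (entries : List (List (String × String))) : Decidable (Pre_sort_variants_py entries) := by
  unfold Pre_sort_variants_py; infer_instance

def pvWitness_sort_variants_py : (List (List (String × String))) :=
  [[("Type", "CNV")], [("Type", "Fusion"), ("Gene", "ALK")]]

def Spec_sort_variants_py (entries : List (List (String × String))) (out : List (String × List (List (String × String)))) : Prop := out = sort_variants_py_alt entries
instance (entries : List (List (String × String))) (out : List (String × List (List (String × String)))) : Decidable (Spec_sort_variants_py entries out) := by unfold Spec_sort_variants_py; infer_instance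

-- ===== CLAIM (what is proved, stated in full; the proofs are below) =====
def Claim_equal_sort_variants_py : Prop := ∀ (entries : List (List (String × String))), Dom_sort_variants_py entries → Pre_sort_variants_py entries → Spec_sort_variants_py entries (sort_variants_py entries)

-- ===== LEMMAS AND PROOFS =====

theorem foldA_filters (l : List (List (String × String)))
    (f s c : List (List (String × String))) :
    l.foldl stepA (f, s, c)
      = (f ++ l.filter isFusB, s ++ l.filter isSmallB, c ++ l.filter isCnvB) := by
  induction l generalizing f s c with
  | nil => simp
  | cons e l ih =>
    simp only [List.foldl_cons, List.filter_cons]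
    cases h : pvTyp e with
    | none =>
      simp [stepA, h, isFusB, isSmallB, isCnvB]
      exact ih f s c
    | some t =>
      by_cases h1 : (t == "Fusion" || t == "RNAExonVariant") = true
      · rcases (by simpa using h1 : t = "Fusion" ∨ t = "RNAExonVariant") with rfl | rfl <;>
          simp [stepA, h, isFusB, isSmallB, isCnvB, ih]
      · by_cases h2 : (t == "CNV") = true
        · simp [stepA, h, h1, h2, isFusB, isSmallB, isCnvB, ih]
        · by_cases h3 : (t == "") = true
          · simp [stepA, h, h1, h2, h3, isFusB, isSmallB, isCnvB]
            exact ih f s c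
          · simp [stepA, h, h1, h2, h3, isFusB, isSmallB, isCnvB, ih]

-- ===== VERDICT (by name: the statement is the Claim_ definition above) =====
theorem sort_variants_py_spec : Claim_equal_sort_variants_py := by
  intro entries _ _
  unfold Spec_sort_variants_py sort_variants_py sort_variants_py_alt
  rw [foldA_filters]
  simp
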